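-- pv_equiv track=rewrite | github.com/hdowens/AoC2024 | day24/day24.py | pp
-- ===== SOURCE A (Python) =====
-- def pp(formula, wire, depth=0):
--     if wire[0] in "xy":
--         return "  " * depth + wire
--     op, x, y = formula[wire]
--     return (
--         "  " * depth
--         + op
--         + f" ({wire})\n"
--         + pp(formula, x, depth + 1)
--         + "\n"
--         + pp(formula, y, depth + 1)
--     )
-- ===== SOURCE B (Python) =====
-- def pp(formula, wire, depth=0):
--     lines = []
--     stack = [(wire, depth)]
--     while stack:
--         w, d = stack.pop()
--         if w[0] in "xy":
--             lines.append("  " * d + w)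
--         else:
--             op, x, y = formula[w]
--             lines.append("  " * d + op + f" ({w})")
--             stack.append((y, d + 1))
--             stack.append((x, d + 1))
--     return "\n".join(lines)
-- ===== Notes on version B (the rewrite author's own statement) =====
-- stated objective: alternative
-- what changed: B replaces A's direct recursion (which concatenates result strings at every call level) with an iterative explicit stack of (wire, depth) pairs that collects the output lines in preorder and joins them once at the end.
import Mathlib
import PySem

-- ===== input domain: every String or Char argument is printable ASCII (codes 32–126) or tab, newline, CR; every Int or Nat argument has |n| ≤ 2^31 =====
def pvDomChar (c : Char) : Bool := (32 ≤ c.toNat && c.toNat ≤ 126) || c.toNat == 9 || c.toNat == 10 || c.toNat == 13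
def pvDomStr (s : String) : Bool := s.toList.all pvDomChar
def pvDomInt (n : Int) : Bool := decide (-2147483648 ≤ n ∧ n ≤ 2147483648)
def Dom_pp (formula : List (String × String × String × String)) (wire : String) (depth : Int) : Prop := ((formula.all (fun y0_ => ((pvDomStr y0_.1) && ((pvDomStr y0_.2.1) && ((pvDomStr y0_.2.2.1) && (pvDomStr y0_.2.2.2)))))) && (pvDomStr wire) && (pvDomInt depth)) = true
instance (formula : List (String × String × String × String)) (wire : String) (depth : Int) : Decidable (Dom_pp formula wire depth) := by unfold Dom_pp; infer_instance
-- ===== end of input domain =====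

-- B replaces A's direct recursion (string concatenation at every level) by an explicit
-- stack of (wire, depth) pairs collecting the output lines, joined once at the end
-- (objective: alternative decomposition, same preorder output).

-- "  " * depth  (Python: negative repeat count gives "")
def ppRep (depth : Int) : String := PySem.Str.join "" (List.replicate depth.toNat "  ")

-- ===== PORT A =====
-- fuel makes the recursion total; Pre_pp guarantees it is never exhausted
def ppGo (d : PySem.Dict String (String × String × String)) : Nat → String → Int → String
  | 0, _, _ => ""
  | fuel+1, wire, depth =>
    match wire.toList with
    | [] => ""                                           -- wire[0] raises IndexError (outside Pre_pp)
    | c :: _ =>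
      if c = 'x' ∨ c = 'y' then ppRep depth ++ wire
      else
        match PySem.Dict.get? d wire with
        | none => ""                                     -- KeyError (outside Pre_pp)
        | some (op, x, y) =>
          ppRep depth ++ op ++ " (" ++ wire ++ ")\n" ++
            ppGo d fuel x (depth + 1) ++ "\n" ++ ppGo d fuel y (depth + 1)

def pp (formula : List (String × String × String × String)) (wire : String) (depth : Int) : String :=
  ppGo (PySem.Dict.mk formula) (formula.length + 1) wire depth

-- ===== PORT B =====
-- Python B's stack has its top at the END of the list; the port keeps the top at the
-- HEAD, so pushing y then x becomes consing x before y (pop = head, same order).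
def ppAltGo (d : PySem.Dict String (String × String × String)) : Nat → List (String × Int) → List String → List String
  | _, [], lines => lines
  | 0, _, lines => lines
  | fuel+1, (w, dep) :: stack, lines =>
    match w.toList with
    | [] => lines                                        -- w[0] raises IndexError (outside Pre_pp)
    | c :: _ =>
      if c = 'x' ∨ c = 'y' then
        ppAltGo d fuel stack (lines ++ [ppRep dep ++ w])
      else
        match PySem.Dict.get? d w with
        | none => lines                                  -- KeyError (outside Pre_pp)
        | some (op, x, y) =>
          ppAltGo d fuel ((x, dep + 1) :: (y, dep + 1) :: stack)
            (lines ++ [ppRep dep ++ op ++ " (" ++ w ++ ")"])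

def pp_alt (formula : List (String × String × String × String)) (wire : String) (depth : Int) : String :=
  PySem.Str.join "\n" (ppAltGo (PySem.Dict.mk formula) (2 ^ (formula.length + 2)) [(wire, depth)] [])

-- ===== PRECONDITION & SPEC =====
-- wire starts with 'x' or 'y' (A stops there without a lookup)
def leafB (w : String) : Bool :=
  match w.toList with
  | [] => false
  | c :: _ => c == 'x' || c == 'y'

-- "evaluating A at w neither raises nor recurses forever", given the set ok of
-- already-known-terminating gate wires
def wireOK (ok : List String) (w : String) : Bool :=
  (!(w == "")) && (leafB w || ok.contains w)

-- standard least-fixpoint iteration on the dependency graph of the formula: the set of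
-- gate wires all of whose dependencies terminate within n rounds (a property of the
-- input graph, not a run of A's algorithm)
def okIter (d : PySem.Dict String (String × String × String)) : Nat → List String
  | 0 => []
  | n+1 =>
    d.keys.filter (fun w =>
      match d.get? w with
      | some (_, x, y) => wireOK (okIter d n) x && wireOK (okIter d n) y
      | none => false)

-- Pre_pp excludes exactly the inputs on which A raises — a reached empty wire name
-- (IndexError), a reached non-leaf wire missing from the formula (KeyError), or a cycle
-- among the reached gates (RecursionError) — stated as: the start wire is nonempty and
-- is a leaf or in the dependency fixpoint.
def Pre_pp (formula : List (String × String × String × String)) (wire : String) (depth : Int) : Prop :=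
  wireOK (okIter (PySem.Dict.mk formula) formula.length) wire = true

instance (formula : List (String × String × String × String)) (wire : String) (depth : Int) : Decidable (Pre_pp formula wire depth) := by
  unfold Pre_pp; infer_instance

def pvWitness_pp : (List (String × String × String × String)) × String × Int :=
  ([("a2", "OR", "x1", "y1"), ("z1", "AND", "a2", "x3")], "z1", 0)

def Spec_pp (formula : List (String × String × String × String)) (wire : String) (depth : Int) (out : String) : Prop := out = pp_alt formula wire depth
instance (formula : List (String × String × String × String)) (wire : String) (depth : Int) (out : String) : Decidable (Spec_pp formula wire depth out) := by unfold Spec_pp; infer_instance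

-- ===== CLAIM (what is proved, stated in full; the proofs are below) =====
def Claim_equal_pp : Prop := ∀ (formula : List (String × String × String × String)) (wire : String) (depth : Int), Dom_pp formula wire depth → Pre_pp formula wire depth → Spec_pp formula wire depth (pp formula wire depth)

-- ===== LEMMAS AND PROOFS =====

-- canonical line list of a subtree (placeholder [""] where A would raise / run out of fuel)
def ppLines (d : PySem.Dict String (String × String × String)) : Nat → String → Int → List String
  | 0, _, _ => [""]
  | fuel+1, w, dep =>
    match w.toList with
    | [] => [""]
    | c :: _ =>
      if c = 'x' ∨ c = 'y' then [ppRep dep ++ w]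
      else
        match PySem.Dict.get? d w with
        | none => [""]
        | some (op, x, y) =>
          (ppRep dep ++ op ++ " (" ++ w ++ ")") :: (ppLines d fuel x (dep + 1) ++ ppLines d fuel y (dep + 1))

lemma ppLines_ne_nil (d : PySem.Dict String (String × String × String)) (f : Nat) (w : String) (dep : Int) :
    ppLines d f w dep ≠ [] := by
  cases f with
  | zero => simp [ppLines]
  | succ f =>
    simp only [ppLines]
    rcases w.toList with _ | ⟨c, cs⟩
    · simp
    · by_cases hc : c = 'x' ∨ c = 'y'
      · simp [hc]
      · rcases PySem.Dict.get? d w with _ | ⟨op, x, y⟩ <;> simp [hc]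

lemma sjoin_singleton (s a : String) : PySem.Str.join s [a] = a := by
  apply String.toList_inj.mp
  simp [PySem.Str.toList_join, PySem.Chars.join_singleton]

lemma sjoin_cons (s a : String) (l : List String) (h : l ≠ []) :
    PySem.Str.join s (a :: l) = a ++ s ++ PySem.Str.join s l := by
  obtain ⟨b, t, rfl⟩ := List.exists_cons_of_ne_nil h
  apply String.toList_inj.mp
  simp [PySem.Str.toList_join, PySem.Chars.join_cons_cons, String.toList_append]

lemma sjoin_append (s : String) (l1 l2 : List String) (h1 : l1 ≠ []) (h2 : l2 ≠ []) :
    PySem.Str.join s (l1 ++ l2) = PySem.Str.join s l1 ++ s ++ PySem.Str.join s l2 := by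
  induction l1 with
  | nil => exact absurd rfl h1
  | cons a t ih =>
    cases t with
    | nil =>
      rw [List.singleton_append, sjoin_cons _ _ _ h2, sjoin_singleton]
    | cons b t2 =>
      rw [List.cons_append, sjoin_cons _ _ _ (by simp), sjoin_cons _ _ _ (by simp),
        ih (by simp)]
      simp [String.append_assoc]

lemma goA_eq_join (d : PySem.Dict String (String × String × String)) (f : Nat) (w : String) (dep : Int) :
    ppGo d f w dep = PySem.Str.join "\n" (ppLines d f w dep) := by
  induction f generalizing w dep with
  | zero => simp [ppGo, ppLines, sjoin_singleton]
  | succ f ih =>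
    simp only [ppGo, ppLines]
    rcases w.toList with _ | ⟨c, cs⟩
    · simp [sjoin_singleton]
    · by_cases hc : c = 'x' ∨ c = 'y'
      · simp [hc, sjoin_singleton]
      · rcases PySem.Dict.get? d w with _ | ⟨op, x, y⟩
        · simp [hc, sjoin_singleton]
        · simp only [hc, if_false]
          rw [ih, ih, sjoin_cons _ _ _ (by simp [ppLines_ne_nil]),
            sjoin_append _ _ _ (ppLines_ne_nil _ _ _ _) (ppLines_ne_nil _ _ _ _),
            show (")\n" : String) = ")" ++ "\n" from rfl]
          simp [String.append_assoc]

lemma ppLines_leaf (d : PySem.Dict String (String × String × String)) (w : String)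
    (hxy : leafB w = true) (f : Nat) (hf : 1 ≤ f) (dep : Int) :
    ppLines d f w dep = [ppRep dep ++ w] := by
  cases f with
  | zero => omega
  | succ f =>
    unfold leafB at hxy
    simp only [ppLines]
    rcases hw : w.toList with _ | ⟨c, cs⟩
    · rw [hw] at hxy; simp at hxy
    · rw [hw] at hxy
      simp only [Bool.or_eq_true, beq_iff_eq] at hxy
      simp [hxy]

lemma ppLines_succ_node (d : PySem.Dict String (String × String × String)) (g : Nat)
    (w : String) (dep : Int) (c : Char) (cs : List Char) (op x y : String)
    (hw : w.toList = c :: cs) (hc : ¬ (c = 'x' ∨ c = 'y'))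
    (hget : d.get? w = some (op, x, y)) :
    ppLines d (g + 1) w dep =
      (ppRep dep ++ op ++ " (" ++ w ++ ")") ::
        (ppLines d g x (dep + 1) ++ ppLines d g y (dep + 1)) := by
  simp only [ppLines, hw, hc, if_false, hget]

lemma nonleaf_head (w : String) (hne : w ≠ "") (hleaf : leafB w = false) :
    ∃ c cs, w.toList = c :: cs ∧ ¬ (c = 'x' ∨ c = 'y') := by
  rcases hw : w.toList with _ | ⟨c, cs⟩
  · exact absurd (String.toList_inj.mp (by simp [hw])) hne
  · refine ⟨c, cs, rfl, ?_⟩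
    unfold leafB at hleaf
    rw [hw] at hleaf
    simp only [Bool.or_eq_false_iff, beq_eq_false_iff_ne] at hleaf
    rintro (rfl | rfl) <;> simp at hleaf

lemma wireOK_mono (ok ok' : List String) (hsub : ∀ x ∈ ok, x ∈ ok') (w : String)
    (h : wireOK ok w = true) : wireOK ok' w = true := by
  simp only [wireOK, Bool.and_eq_true, Bool.or_eq_true, List.contains_iff_mem] at h ⊢
  exact ⟨h.1, h.2.imp id (hsub w)⟩

lemma okIter_mem_elim (d : PySem.Dict String (String × String × String)) (n : Nat) (w : String)
    (h : w ∈ okIter d (n + 1)) :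
    ∃ op x y, d.get? w = some (op, x, y) ∧
      wireOK (okIter d n) x = true ∧ wireOK (okIter d n) y = true := by
  simp only [okIter, List.mem_filter] at h
  obtain ⟨-, hp⟩ := h
  rcases hget : d.get? w with _ | ⟨op, x, y⟩ <;> rw [hget] at hp
  · simp at hp
  · simp only [Bool.and_eq_true] at hp
    exact ⟨op, x, y, rfl, hp.1, hp.2⟩

lemma okIter_mem_intro (d : PySem.Dict String (String × String × String)) (n : Nat) (w : String)
    (hk : w ∈ d.keys) (op x y : String) (hget : d.get? w = some (op, x, y))
    (hx : wireOK (okIter d n) x = true) (hy : wireOK (okIter d n) y = true) :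
    w ∈ okIter d (n + 1) := by
  simp only [okIter, List.mem_filter]
  exact ⟨hk, by rw [hget]; simp [hx, hy]⟩

lemma okIter_mono (d : PySem.Dict String (String × String × String)) :
    ∀ n, ∀ w ∈ okIter d n, w ∈ okIter d (n + 1) := by
  intro n
  induction n with
  | zero => intro w hw; simp [okIter] at hw
  | succ n ih =>
    intro w hw
    obtain ⟨op, x, y, hget, hx, hy⟩ := okIter_mem_elim d n w hw
    have hk : w ∈ d.keys := by
      simp only [okIter, List.mem_filter] at hw
      exact hw.1
    exact okIter_mem_intro d (n + 1) w hk op x y hget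
      (wireOK_mono _ _ ih x hx) (wireOK_mono _ _ ih y hy)

lemma lines_stable (d : PySem.Dict String (String × String × String)) :
    ∀ n w dep, wireOK (okIter d n) w = true → ∀ f, n < f →
      ppLines d f w dep = ppLines d (n + 1) w dep := by
  intro n
  induction n using Nat.strong_induction_on with
  | _ n ihn =>
  intro w dep hok f hf
  simp only [wireOK, Bool.and_eq_true, Bool.or_eq_true, Bool.not_eq_eq_eq_not, Bool.not_true,
    beq_eq_false_iff_ne, List.contains_iff_mem] at hok
  obtain ⟨hne, hor⟩ := hok
  by_cases hleaf : leafB w = true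
  · rw [ppLines_leaf _ _ hleaf _ (by omega), ppLines_leaf _ _ hleaf _ (by omega)]
  · have hmem : w ∈ okIter d n := by
      rcases hor with h | h
      · exact absurd h hleaf
      · exact h
    obtain ⟨m, rfl⟩ : ∃ m, n = m + 1 := by
      cases n with
      | zero => simp [okIter] at hmem
      | succ m => exact ⟨m, rfl⟩
    obtain ⟨op, x, y, hget, hx, hy⟩ := okIter_mem_elim d m w hmem
    obtain ⟨c, cs, hw, hc⟩ := nonleaf_head w hne (Bool.not_eq_true _ ▸ hleaf)
    obtain ⟨g, rfl⟩ : ∃ g, f = g + 1 := ⟨f - 1, by omega⟩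
    rw [ppLines_succ_node _ _ _ _ _ _ _ _ _ hw hc hget,
      ppLines_succ_node _ _ _ _ _ _ _ _ _ hw hc hget,
      ihn m (by omega) x (dep + 1) hx g (by omega),
      ihn m (by omega) y (dep + 1) hy g (by omega),
      ihn m (by omega) x (dep + 1) hx (m + 1) (by omega),
      ihn m (by omega) y (dep + 1) hy (m + 1) (by omega)]

-- expanding a non-leaf OK wire at the canonical fuel N+1
lemma lines_expandN (d : PySem.Dict String (String × String × String)) (N : Nat)
    (w : String) (dep : Int) (hne : w ≠ "") (hleaf : leafB w = false)
    (hmem : w ∈ okIter d N) :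
    ∃ op x y, d.get? w = some (op, x, y) ∧
      wireOK (okIter d N) x = true ∧ wireOK (okIter d N) y = true ∧
      ppLines d (N + 1) w dep =
        (ppRep dep ++ op ++ " (" ++ w ++ ")") ::
          (ppLines d (N + 1) x (dep + 1) ++ ppLines d (N + 1) y (dep + 1)) := by
  obtain ⟨M, rfl⟩ : ∃ M, N = M + 1 := by
    cases N with
    | zero => simp [okIter] at hmem
    | succ M => exact ⟨M, rfl⟩
  obtain ⟨op, x, y, hget, hx, hy⟩ := okIter_mem_elim d M w hmem
  obtain ⟨c, cs, hw, hc⟩ := nonleaf_head w hne hleaf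
  have hsub := okIter_mono d M
  refine ⟨op, x, y, hget, wireOK_mono _ _ hsub x hx, wireOK_mono _ _ hsub y hy, ?_⟩
  rw [ppLines_succ_node _ _ _ _ _ _ _ _ _ hw hc hget,
    lines_stable d M x (dep + 1) hx (M + 1) (by omega),
    lines_stable d M y (dep + 1) hy (M + 1) (by omega),
    lines_stable d M x (dep + 1) hx (M + 1 + 1) (by omega),
    lines_stable d M y (dep + 1) hy (M + 1 + 1) (by omega)]

lemma ppLines_len_le (d : PySem.Dict String (String × String × String)) (f : Nat) (w : String) (dep : Int) :
    (ppLines d f w dep).length ≤ 2 ^ (f + 1) - 1 := by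
  induction f generalizing w dep with
  | zero => simp [ppLines]
  | succ f ih =>
    simp only [ppLines]
    rcases w.toList with _ | ⟨c, cs⟩
    · have := Nat.one_le_two_pow (n := f); simp; omega
    · by_cases hc : c = 'x' ∨ c = 'y'
      · have := Nat.one_le_two_pow (n := f); simp [hc]; omega
      · rcases PySem.Dict.get? d w with _ | ⟨op, x, y⟩
        · have := Nat.one_le_two_pow (n := f); simp [hc]; omega
        · simp only [hc, if_false, List.length_cons, List.length_append]
          have h1 := ih x (dep + 1)
          have h2 := ih y (dep + 1)
          have h3 : 2 ^ (f + 1) + 2 ^ (f + 1) = 2 ^ (f + 1 + 1) := by ring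
          have := Nat.one_le_two_pow (n := f)
          omega

lemma goB_nil (d : PySem.Dict String (String × String × String)) (f : Nat) (lines : List String) :
    ppAltGo d f [] lines = lines := by
  cases f <;> rfl

lemma goB_spec (d : PySem.Dict String (String × String × String)) (N : Nat) :
    ∀ f (stack : List (String × Int)) (lines : List String),
      (∀ p ∈ stack, wireOK (okIter d N) p.1 = true) →
      ((stack.map (fun p => (ppLines d (N + 1) p.1 p.2).length)).sum ≤ f) →
      ppAltGo d f stack lines =
        lines ++ stack.flatMap (fun p => ppLines d (N + 1) p.1 p.2) := by
  intro f
  induction f with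
  | zero =>
    intro stack lines hgood hsum
    cases stack with
    | nil => rw [goB_nil]; simp
    | cons p rest =>
      exfalso
      have h1 : 0 < (ppLines d (N + 1) p.1 p.2).length :=
        List.length_pos_iff.mpr (ppLines_ne_nil _ _ _ _)
      simp only [List.map_cons, List.sum_cons] at hsum
      omega
  | succ f ih =>
    intro stack lines hgood hsum
    cases stack with
    | nil => rw [goB_nil]; simp
    | cons p rest =>
      obtain ⟨w, dep⟩ := p
      have hokw := hgood (w, dep) (List.mem_cons_self ..)
      have hne : w ≠ "" := by
        simp only [wireOK, Bool.and_eq_true, Bool.not_eq_eq_eq_not, Bool.not_true,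
          beq_eq_false_iff_ne] at hokw
        exact hokw.1
      by_cases hleaf : leafB w = true
      · obtain ⟨c, cs, hw, hc⟩ : ∃ c cs, w.toList = c :: cs ∧ (c = 'x' ∨ c = 'y') := by
          unfold leafB at hleaf
          rcases hw : w.toList with _ | ⟨c, cs⟩
          · rw [hw] at hleaf; simp at hleaf
          · rw [hw] at hleaf
            simp only [Bool.or_eq_true, beq_iff_eq] at hleaf
            exact ⟨c, cs, rfl, hleaf⟩
        simp only [ppAltGo, hw, if_pos hc]
        rw [ih rest (lines ++ [ppRep dep ++ w])
            (fun q hq => hgood q (List.mem_cons_of_mem _ hq)) ?_]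
        · simp only [List.flatMap_cons]
          rw [ppLines_leaf _ _ hleaf _ (by omega)]
          simp [List.append_assoc]
        · simp only [List.map_cons, List.sum_cons] at hsum
          rw [ppLines_leaf _ _ hleaf _ (by omega)] at hsum
          simp only [List.length_singleton] at hsum
          omega
      · have hmem : w ∈ okIter d N := by
          simp only [wireOK, Bool.and_eq_true, Bool.or_eq_true, List.contains_iff_mem] at hokw
          rcases hokw.2 with h | h
          · exact absurd h hleaf
          · exact h
        obtain ⟨op, x, y, hget, hx, hy, hexp⟩ :=
          lines_expandN d N w dep hne (Bool.not_eq_true _ ▸ hleaf) hmem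
        obtain ⟨c, cs, hw, hc⟩ := nonleaf_head w hne (Bool.not_eq_true _ ▸ hleaf)
        simp only [ppAltGo, hw, if_neg hc, hget]
        rw [ih ((x, dep + 1) :: (y, dep + 1) :: rest)
            (lines ++ [ppRep dep ++ op ++ " (" ++ w ++ ")"]) ?_ ?_]
        · simp only [List.flatMap_cons]
          rw [hexp]
          simp [List.append_assoc]
        · intro q hq
          rcases List.mem_cons.mp hq with rfl | hq2
          · exact hx
          rcases List.mem_cons.mp hq2 with rfl | hq3
          · exact hy
          · exact hgood q (List.mem_cons_of_mem _ hq3)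
        · simp only [List.map_cons, List.sum_cons] at hsum ⊢
          rw [hexp] at hsum
          simp only [List.length_cons, List.length_append] at hsum
          omega

-- ===== VERDICT (by name: the statement is the Claim_ definition above) =====
theorem pp_spec : Claim_equal_pp := by
  unfold Claim_equal_pp
  intro formula wire depth hDom hPre
  unfold Spec_pp pp pp_alt
  have hok := hPre
  set d := PySem.Dict.mk formula with hd
  set N := formula.length with hN
  rw [goA_eq_join]
  rw [goB_spec d N (2 ^ (N + 2)) [(wire, depth)] []
      (by rintro q hq
          rcases List.mem_cons.mp hq with rfl | h
          · exact hok
          · cases h)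
      (by simp only [List.map_cons, List.map_nil, List.sum_cons, List.sum_nil]
          have hb := ppLines_len_le d (N + 1) wire depth
          have h2 : (2:Nat) ^ (N + 1 + 1) = 2 ^ (N + 2) := rfl
          have h3 := Nat.one_le_two_pow (n := N + 2)
          have h4 := Nat.one_le_two_pow (n := N)
          omega)]
  simp
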